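-- pv_equiv track=rewrite | github.com/Pedrxla/Audio-and-text-conversor-.py | conversormarimari.py | pontuar_texto
-- ===== SOURCE A (Python) =====
-- def pontuar_texto(texto):
--     perguntas = [
--         "quem", "quando", "onde", "como", "qual",
--         "quais", "por que", "o que", "pra que",
--     ]
--     texto_lower = texto.lower()
--     for p in perguntas:
--         if texto_lower.startswith(p) or f" {p} " in texto_lower:
--             return texto.strip().capitalize() + "?"
--     return texto.strip().capitalize() + "."
-- ===== SOURCE B (Python) =====
-- MARCAS = ("quem", "quando", "onde", "como", "qual",
--           "quais", "por que", "o que", "pra que")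
--
--
-- def pontuar_texto(texto):
--     t = texto.lower()
--
--     def casa(pos, borda):
--         # does some marker start at pos? interior occurrences need a trailing space
--         for m in MARCAS:
--             fim = pos + len(m)
--             if t[pos:fim] == m and (not borda or t[fim:fim + 1] == " "):
--                 return True
--         return False
--
--     pergunta = casa(0, False) or any(
--         t[i] == " " and casa(i + 1, True) for i in range(len(t)))
--     return texto.strip().capitalize() + ("?" if pergunta else ".")
-- ===== Notes on version B (the rewrite author's own statement) =====
-- stated objective: alternative
-- what changed: Replaces the marker-outer loop of nine separate startswith/substring scans by a single position-wise left-to-right scan that tests the whole marker alternation (with its boundary rules) at each space boundary, so no repeated full-text substring scans remain.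
import Mathlib
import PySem

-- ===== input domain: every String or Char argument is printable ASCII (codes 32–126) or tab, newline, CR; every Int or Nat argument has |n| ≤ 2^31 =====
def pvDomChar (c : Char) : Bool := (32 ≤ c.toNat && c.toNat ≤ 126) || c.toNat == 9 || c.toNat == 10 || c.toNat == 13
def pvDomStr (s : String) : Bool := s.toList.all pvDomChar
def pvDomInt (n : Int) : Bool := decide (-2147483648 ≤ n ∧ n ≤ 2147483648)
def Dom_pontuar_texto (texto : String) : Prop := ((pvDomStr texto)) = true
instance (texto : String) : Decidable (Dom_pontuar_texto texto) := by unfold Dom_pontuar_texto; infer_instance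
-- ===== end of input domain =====

-- B replaces A's nine separate startswith/substring scans by one position-wise scan; alternative decomposition, same cost.

-- Python's str.capitalize() (first char upper, rest lower) — hand port, exact on the ASCII domain.
def pyCapitalize (s : String) : String :=
  match s.toList with
  | [] => ""
  | c :: rest => String.ofList (PySem.Chars.upperChar c :: PySem.Chars.lower rest)

-- ===== PORT A =====
def pontuarA_perguntas : List String :=
  ["quem", "quando", "onde", "como", "qual", "quais", "por que", "o que", "pra que"]

-- A's for-loop with early return, one marker at a time.
def pontuarA_go (texto texto_lower : String) : List String → String
  | [] => pyCapitalize (PySem.Str.strip texto) ++ "."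
  | p :: ps =>
    if PySem.Str.startswith texto_lower p || PySem.Str.isIn (" " ++ p ++ " ") texto_lower then
      pyCapitalize (PySem.Str.strip texto) ++ "?"
    else pontuarA_go texto texto_lower ps

def pontuar_texto (texto : String) : String :=
  pontuarA_go texto (PySem.Str.lower texto) pontuarA_perguntas

-- ===== PORT B =====
def pvMarcas : List (List Char) :=
  ["quem".toList, "quando".toList, "onde".toList, "como".toList, "qual".toList,
   "quais".toList, "por que".toList, "o que".toList, "pra que".toList]

-- Source B's casa(pos, borda); t[pos:fim] with 0 ≤ pos ≤ fim is (t.drop pos).take (fim-pos) (slice_natCast).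
def pvCasa (t : List Char) (pos : Nat) (borda : Bool) : Bool :=
  pvMarcas.any (fun m =>
    decide ((t.drop pos).take m.length = m) &&
    (!borda || decide ((t.drop (pos + m.length)).take 1 = [' '])))

def pontuar_texto_alt (texto : String) : String :=
  let t := (PySem.Str.lower texto).toList
  let pergunta := pvCasa t 0 false ||
    (List.range t.length).any (fun i => decide (t.getD i ' ' = ' ') && pvCasa t (i + 1) true)
  pyCapitalize (PySem.Str.strip texto) ++ (if pergunta then "?" else ".")

-- ===== PRECONDITION & SPEC =====
def Spec_pontuar_texto (texto : String) (out : String) : Prop := out = pontuar_texto_alt texto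
instance (texto : String) (out : String) : Decidable (Spec_pontuar_texto texto out) := by unfold Spec_pontuar_texto; infer_instance

-- ===== CLAIM (what is proved, stated in full; the proofs are below) =====
def Claim_equal_pontuar_texto : Prop := ∀ (texto : String), Dom_pontuar_texto texto → Spec_pontuar_texto texto (pontuar_texto texto)

-- ===== LEMMAS AND PROOFS =====

-- A's loop returns "?" iff some marker fires.
theorem pontuarA_go_eq (texto texto_lower : String) (ms : List String) :
    pontuarA_go texto texto_lower ms =
      pyCapitalize (PySem.Str.strip texto) ++
        (if ms.any (fun p => PySem.Str.startswith texto_lower p ||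
              PySem.Str.isIn (" " ++ p ++ " ") texto_lower) then "?" else ".") := by
  induction ms with
  | nil => simp [pontuarA_go]
  | cons p ps ih =>
    cases hc : (PySem.Str.startswith texto_lower p ||
        PySem.Str.isIn (" " ++ p ++ " ") texto_lower) with
    | true =>
      have : pontuarA_go texto texto_lower (p :: ps) =
          pyCapitalize (PySem.Str.strip texto) ++ "?" := by
        simp only [pontuarA_go, hc]; rfl
      rw [this, List.any_cons, hc]; simp
    | false =>
      have : pontuarA_go texto texto_lower (p :: ps) = pontuarA_go texto texto_lower ps := by
        simp only [pontuarA_go, hc]; rfl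
      rw [this, List.any_cons, hc, ih]; simp

theorem take_one_drop_iff (t : List Char) (j : Nat) :
    (t.drop j).take 1 = [' '] ↔ j < t.length ∧ t.getD j ' ' = ' ' := by
  rw [List.take_one, List.head?_drop, List.getD_eq_getElem?_getD]
  cases hj : t[j]? with
  | none =>
    have : ¬ j < t.length := by
      have := List.getElem?_eq_none_iff.mp hj; omega
    simp [this]
  | some c =>
    have : j < t.length := by
      rcases Nat.lt_or_ge j t.length with h | h
      · exact h
      · rw [List.getElem?_eq_none_iff.mpr h] at hj; cases hj
    simp [this]

theorem prefix_iff_take_eq {α : Type} (l s : List α) : l <+: s ↔ (s.take l.length) = l := by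
  constructor
  · intro h; exact (List.prefix_iff_eq_take.mp h).symm
  · intro h; exact List.prefix_iff_eq_take.mpr h.symm

-- (' ' :: s) is a prefix iff the head is ' ' and s is a prefix of the tail
theorem cons_space_prefix_iff (q d : List Char) :
    (' ' :: q) <+: d ↔ d.take 1 = [' '] ∧ q <+: d.drop 1 := by
  constructor
  · rintro ⟨r, hr⟩
    subst hr; simp
  · rintro ⟨h1, q', hq'⟩
    refine ⟨q', ?_⟩
    conv_rhs => rw [← List.take_append_drop 1 d]
    rw [h1, ← hq']
    rfl
-- (m ++ [' ']) is a prefix iff its two pvCasa slice tests hold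
theorem append_space_prefix_iff (m e : List Char) :
    (m ++ [' ']) <+: e ↔ e.take m.length = m ∧ (e.drop m.length).take 1 = [' '] := by
  constructor
  · rintro ⟨r, hr⟩
    subst hr
    rw [List.append_assoc]
    refine ⟨List.take_left, ?_⟩
    rw [List.drop_left]; rfl
  · rintro ⟨h1, h2⟩
    refine ⟨(e.drop m.length).drop 1, ?_⟩
    conv_rhs => rw [← List.take_append_drop m.length e,
      ← List.take_append_drop 1 (e.drop m.length)]
    rw [h1, h2]
    simp

-- pvCasa characterized by prefixes
theorem pvCasa_true_iff (t : List Char) (q : Nat) :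
    pvCasa t q true = true ↔ ∃ m ∈ pvMarcas, (m ++ [' ']) <+: t.drop q := by
  simp only [pvCasa, List.any_eq_true, Bool.and_eq_true, decide_eq_true_eq,
    Bool.not_true, Bool.false_or]
  constructor
  · rintro ⟨m, hm, h1, h2⟩
    refine ⟨m, hm, (append_space_prefix_iff m (t.drop q)).mpr ⟨h1, ?_⟩⟩
    rwa [List.drop_drop]
  · rintro ⟨m, hm, h⟩
    obtain ⟨h1, h2⟩ := (append_space_prefix_iff m (t.drop q)).mp h
    exact ⟨m, hm, h1, by rwa [List.drop_drop] at h2⟩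

theorem pvCasa_false_iff (t : List Char) :
    pvCasa t 0 false = true ↔ ∃ m ∈ pvMarcas, m <+: t := by
  simp only [pvCasa, List.any_eq_true, Bool.and_eq_true, decide_eq_true_eq,
    Bool.not_false, Bool.true_or, and_true, List.drop_zero]
  constructor
  · rintro ⟨m, hm, h⟩
    exact ⟨m, hm, (prefix_iff_take_eq m t).mpr h⟩
  · rintro ⟨m, hm, h⟩
    exact ⟨m, hm, (prefix_iff_take_eq m t).mp h⟩

theorem pvMarcas_eq : pvMarcas = pontuarA_perguntas.map String.toList := rfl

-- condition equality: A's per-marker disjunction equals B's position scan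
theorem cond_eq (t : List Char) :
    (pontuarA_perguntas.any (fun p =>
        PySem.Chars.startswith t p.toList ||
        PySem.Chars.isIn (' ' :: (p.toList ++ [' '])) t)) =
      (pvCasa t 0 false ||
        (List.range t.length).any (fun i =>
          decide (t.getD i ' ' = ' ') && pvCasa t (i + 1) true)) := by
  rw [Bool.eq_iff_iff]
  simp only [List.any_eq_true, Bool.or_eq_true, Bool.and_eq_true, decide_eq_true_eq,
    List.mem_range, PySem.Chars.startswith_iff, pvCasa_false_iff, pvCasa_true_iff,
    pvMarcas_eq, List.mem_map]
  constructor
  · rintro ⟨p, hp, h | h⟩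
    · exact Or.inl ⟨p.toList, ⟨p, hp, rfl⟩, h⟩
    · -- infix gives a position j of the leading space
      obtain ⟨j, hj⟩ := (PySem.Chars.exists_prefix_drop_iff_isIn (' ' :: (p.toList ++ [' '])) t).mpr h
      obtain ⟨h1, h2⟩ := (cons_space_prefix_iff _ _).mp hj
      obtain ⟨hlt, hget⟩ := (take_one_drop_iff t j).mp h1
      refine Or.inr ⟨j, hlt, hget, p.toList, ⟨p, hp, rfl⟩, ?_⟩
      rwa [List.drop_drop] at h2
  · rintro (⟨m, ⟨p, hp, rfl⟩, h⟩ | ⟨i, hi, hget, m, ⟨p, hp, rfl⟩, h⟩)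
    · exact ⟨p, hp, Or.inl h⟩
    · refine ⟨p, hp, Or.inr ((PySem.Chars.isIn_iff_infix _ t).mpr ?_)⟩
      have hpre : (' ' :: (p.toList ++ [' '])) <+: t.drop i := by
        refine (cons_space_prefix_iff _ _).mpr ⟨(take_one_drop_iff t i).mpr ⟨hi, hget⟩, ?_⟩
        rwa [List.drop_drop]
      exact (List.IsPrefix.isInfix hpre).trans (List.drop_suffix i t).isInfix

-- ===== VERDICT (by name: the statement is the Claim_ definition above) =====
theorem pontuar_texto_spec : Claim_equal_pontuar_texto := by
  intro texto _
  show pontuar_texto texto = pontuar_texto_alt texto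
  have hs : ∀ p : String, (" " ++ p ++ " ").toList = ' ' :: (p.toList ++ [' ']) := by
    intro p; simp
  simp only [pontuar_texto, pontuar_texto_alt, pontuarA_go_eq, PySem.Str.startswith_eq,
    PySem.Str.isIn_eq, hs]
  rw [cond_eq]
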